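-- pv_equiv track=rewrite | github.com/GPA95/PromptWizard_IPW | Bookkeeper.py | analyze_bookkeeper
-- ===== SOURCE A (Python) =====
-- def analyze_bookkeeper(word):
--     word = word.lower()
--
--     # 1. Count consecutive double letter pairs
--     double_pairs = 0
--     for i in range(len(word) - 1):
--         if word[i] == word[i+1]:
--             double_pairs += 1
--
--     # 2. Count the total number of the letter 'e'
--     e_count = word.count('e')
--
--     # 3. Multiply and return result
--     return double_pairs * e_count
-- ===== SOURCE B (Python) =====
-- def analyze_bookkeeper(word):
--     # Run-compression decomposition: a word with g maximal runs of equal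
--     # letters has exactly len(word) - g adjacent equal pairs, so no adjacent
--     # index comparisons are needed.
--     w = word.lower()
--     groups = 0
--     prev = None
--     for c in w:
--         if c != prev:
--             groups += 1
--             prev = c
--     return (len(w) - groups) * w.count('e')
-- ===== Notes on version B (the rewrite author's own statement) =====
-- stated objective: alternative
-- what changed: Replaces the index loop comparing word[i] with word[i+1] by a run-compression scan counting maximal runs of equal letters, using the identity pairs = len(word) - number_of_runs.
import Mathlib
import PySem

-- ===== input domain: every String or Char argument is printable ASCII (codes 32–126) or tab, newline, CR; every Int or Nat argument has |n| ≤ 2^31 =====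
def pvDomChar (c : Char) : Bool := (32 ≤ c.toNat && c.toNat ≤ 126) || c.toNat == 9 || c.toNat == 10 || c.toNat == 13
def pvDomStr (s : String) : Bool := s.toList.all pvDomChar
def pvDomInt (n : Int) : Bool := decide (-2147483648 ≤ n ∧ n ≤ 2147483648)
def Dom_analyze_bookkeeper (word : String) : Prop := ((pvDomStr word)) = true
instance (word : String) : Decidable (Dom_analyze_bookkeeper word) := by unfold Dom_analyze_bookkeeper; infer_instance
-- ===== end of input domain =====

-- B replaces A's index loop over adjacent pairs by a run-compression scan
-- (count maximal runs, pairs = len - runs); same O(n) cost, alternative algorithm.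

-- ===== PORT A =====
def analyze_bookkeeper (word : String) : Int :=
  let w := PySem.Chars.lower word.toList
  let double_pairs :=
    (PySem.List.pyRange 0 ((w.length : Int) - 1) 1).foldl
      (fun acc i =>
        if PySem.List.pyGetD w i ' ' = PySem.List.pyGetD w (i + 1) ' ' then acc + 1 else acc)
      (0 : Int)
  let e_count := (PySem.Chars.count w ['e'] : Int)
  double_pairs * e_count

-- ===== PORT B =====
def analyze_bookkeeper_alt (word : String) : Int :=
  let w := PySem.Chars.lower word.toList
  let st := w.foldl
      (fun (st : Int × Option Char) c =>
        if some c ≠ st.2 then (st.1 + 1, some c) else st)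
      ((0 : Int), (none : Option Char))
  ((w.length : Int) - st.1) * (PySem.Chars.count w ['e'] : Int)

-- ===== PRECONDITION & SPEC =====
def Spec_analyze_bookkeeper (word : String) (out : Int) : Prop := out = analyze_bookkeeper_alt word
instance (word : String) (out : Int) : Decidable (Spec_analyze_bookkeeper word out) := by unfold Spec_analyze_bookkeeper; infer_instance

-- ===== CLAIM (what is proved, stated in full; the proofs are below) =====
def Claim_equal_analyze_bookkeeper : Prop := ∀ (word : String), Dom_analyze_bookkeeper word → Spec_analyze_bookkeeper word (analyze_bookkeeper word)

-- ===== LEMMAS AND PROOFS =====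

-- number of adjacent equal pairs in p :: cs
def pvEqAdj (p : Char) : List Char → Nat
  | [] => 0
  | c :: cs => (if p = c then 1 else 0) + pvEqAdj c cs

-- B's run-counting loop, once started: result = g + (chars left) - (adjacent equal pairs of p :: cs)
theorem pvGroups_loop (cs : List Char) (p : Char) (g : Int) :
    (cs.foldl (fun (st : Int × Option Char) c =>
        if some c ≠ st.2 then (st.1 + 1, some c) else st) (g, some p)).1
      = g + (cs.length : Int) - (pvEqAdj p cs : Int) := by
  induction cs generalizing p g with
  | nil => simp [pvEqAdj]
  | cons c cs ih =>
    by_cases h : c = p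
    · subst h
      simp only [List.foldl_cons, pvEqAdj]
      rw [if_neg (by simp)]
      rw [ih]
      simp only [List.length_cons]; push_cast; ring
    · simp only [List.foldl_cons, pvEqAdj]
      rw [if_pos (by simp [h])]
      rw [ih]
      have hpc : ¬ (p = c) := fun hh => h hh.symm
      simp only [List.length_cons, hpc, if_false]
      push_cast; ring

-- A's index loop counts the adjacent equal pairs
theorem pvCountP_adj (c : Char) (cs : List Char) :
    (List.range cs.length).countP
      (fun k => decide ((c :: cs).getD k ' ' = (c :: cs).getD (k+1) ' ')) = pvEqAdj c cs := by
  induction cs generalizing c with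
  | nil => simp [pvEqAdj]
  | cons b t ih =>
    rw [List.length_cons, List.range_succ_eq_map, List.countP_cons, List.countP_map]
    have hpred : ((fun k => decide ((c :: b :: t).getD k ' ' = (c :: b :: t).getD (k+1) ' ')) ∘ Nat.succ)
        = (fun k => decide ((b :: t).getD k ' ' = (b :: t).getD (k+1) ' ')) := by
      funext k
      simp [Function.comp]
    rw [hpred, ih b]
    simp [pvEqAdj, Nat.add_comm]


theorem pvPairs_loop (w : List Char) :
    ((PySem.List.pyRange 0 ((w.length : Int) - 1) 1).foldl
      (fun acc i =>
        if PySem.List.pyGetD w i ' ' = PySem.List.pyGetD w (i + 1) ' ' then acc + 1 else acc)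
      (0 : Int))
    = (match w with | [] => (0 : Int) | c :: cs => (pvEqAdj c cs : Int)) := by
  cases w with
  | nil => simp [PySem.List.pyRange]
  | cons c cs =>
    rw [PySem.List.foldl_ite_add_one]
    rw [show ((c :: cs).length : Int) - 1 = (cs.length : Int) by simp]
    rw [PySem.List.pyRange_zero_natCast, List.countP_map]
    have hpred : ((fun x : Int => decide (PySem.List.pyGetD (c :: cs) x ' ' = PySem.List.pyGetD (c :: cs) (x + 1) ' ')) ∘ (fun k : Nat => (k : Int)))
        = fun k : Nat => decide ((c :: cs).getD k ' ' = (c :: cs).getD (k+1) ' ') := by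
      funext k
      have h1 : PySem.List.pyGetD (c :: cs) ((k : Int)) ' ' = (c :: cs).getD k ' ' := by simp
      have h2 : PySem.List.pyGetD (c :: cs) ((k : Int) + 1) ' ' = (c :: cs).getD (k+1) ' ' := by
        have ht : ((k : Int) + 1).toNat = k + 1 := by omega
        rw [PySem.List.pyGetD_of_nonneg _ _ (by positivity), ht]
      simp [Function.comp, h1, h2]
    rw [hpred, pvCountP_adj]
    simp


theorem pvKey (w : List Char) :
    ((PySem.List.pyRange 0 ((w.length : Int) - 1) 1).foldl
      (fun acc i =>
        if PySem.List.pyGetD w i ' ' = PySem.List.pyGetD w (i + 1) ' ' then acc + 1 else acc)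
      (0 : Int))
    = (w.length : Int) -
      (w.foldl (fun (st : Int × Option Char) c =>
        if some c ≠ st.2 then (st.1 + 1, some c) else st) ((0 : Int), none)).1 := by
  cases w with
  | nil => simp [PySem.List.pyRange]
  | cons c cs =>
    rw [pvPairs_loop]
    simp only [List.foldl_cons]
    rw [if_pos (by simp)]
    rw [pvGroups_loop]
    simp only [List.length_cons]; push_cast; ring

-- ===== VERDICT (by name: the statement is the Claim_ definition above) =====
theorem analyze_bookkeeper_spec : Claim_equal_analyze_bookkeeper := by
  intro word _
  unfold Spec_analyze_bookkeeper analyze_bookkeeper analyze_bookkeeper_alt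
  simp only []
  rw [pvKey]
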